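-- pv_equiv track=rewrite | github.com/adventofcode2017/adventofcode2017 | problems/day_04.py | part_two
-- ===== SOURCE A (Python) =====
-- def part_two(passphrases):
--     # Return variable
--     count = 0
--
--     for passphrase in passphrases:
--         # Set to captured observed words
--         words = set()
--         for word in passphrase:
--             # Sort letters as order in anagrams do not matter
--             word_sorted = ''.join(sorted(word))
--             if word_sorted in words:
--                 break
--             else:
--                 words.add(word_sorted)
--         else:
--             # Count only if we didn't break
--             count += 1
--
--     return count
-- ===== SOURCE B (Python) =====
-- def part_two(passphrases):
--     # sort the canonical keys and look for equal neighbours, instead of a hash set with early break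
--     def valid(passphrase):
--         keys = sorted(''.join(sorted(word)) for word in passphrase)
--         return all(a != b for a, b in zip(keys, keys[1:]))
--     return sum(map(valid, passphrases))
-- ===== Notes on version B (the rewrite author's own statement) =====
-- stated objective: alternative
-- what changed: Replaces the incremental hash-set duplicate scan (membership test, break, for/else) by sorting the list of canonical keys per passphrase and checking adjacent pairs for equality, summing the boolean results.
import Mathlib
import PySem

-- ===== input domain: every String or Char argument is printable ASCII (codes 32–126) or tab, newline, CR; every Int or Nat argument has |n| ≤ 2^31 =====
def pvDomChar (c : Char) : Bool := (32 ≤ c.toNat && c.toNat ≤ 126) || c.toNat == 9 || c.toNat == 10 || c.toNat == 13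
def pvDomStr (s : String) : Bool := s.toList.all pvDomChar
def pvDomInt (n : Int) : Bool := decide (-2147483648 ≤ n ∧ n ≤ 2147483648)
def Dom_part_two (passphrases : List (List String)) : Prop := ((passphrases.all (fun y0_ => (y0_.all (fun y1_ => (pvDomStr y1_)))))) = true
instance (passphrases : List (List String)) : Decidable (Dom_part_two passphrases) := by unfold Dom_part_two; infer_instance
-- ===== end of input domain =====

-- B replaces A's incremental hash-set duplicate scan (membership test, break, for/else)
-- by sorting the canonical keys of each passphrase and scanning adjacent pairs: alternative algorithm.

-- ===== PORT A =====
-- ''.join(sorted(word)): sorting the 1-char strings of `word` and joining = sorting the chars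
-- (1-char strings compare exactly as their chars); exact on all inputs.
def pvKey (w : String) : String := String.ofList (PySem.List.sorted w.toList (fun c => c) false)

-- the inner 'for word in passphrase: … break … else' loop; returns true iff no break occurred
def pvInner (words : PySem.Set String) : List String → Bool
  | [] => true
  | w :: rest =>
      let k := pvKey w
      if PySem.Set.contains words k then false
      else pvInner (PySem.Set.add words k) rest

def part_two (passphrases : List (List String)) : Int :=
  passphrases.foldl
    (fun count passphrase =>
      if pvInner PySem.Set.empty passphrase then count + 1 else count) 0

-- ===== PORT B =====
-- keys = sorted(''.join(sorted(word)) for word in passphrase); all(a != b for a, b in zip(keys, keys[1:]))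
def pvValid (passphrase : List String) : Bool :=
  let keys := PySem.List.sorted (passphrase.map pvKey) (fun s => s) false
  (keys.zip keys.tail).all (fun q => q.1 != q.2)

def part_two_alt (passphrases : List (List String)) : Int :=
  (passphrases.map (fun p => if pvValid p then (1 : Int) else 0)).sum

-- ===== PRECONDITION & SPEC =====
def Spec_part_two (passphrases : List (List String)) (out : Int) : Prop := out = part_two_alt passphrases
instance (passphrases : List (List String)) (out : Int) : Decidable (Spec_part_two passphrases out) := by unfold Spec_part_two; infer_instance

-- ===== CLAIM (what is proved, stated in full; the proofs are below) =====
def Claim_equal_part_two : Prop := ∀ (passphrases : List (List String)), Dom_part_two passphrases → Spec_part_two passphrases (part_two passphrases)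

-- ===== LEMMAS AND PROOFS =====

-- A's inner loop succeeds iff the keys of the words are pairwise distinct and all fresh w.r.t. s
theorem pvInner_iff (l : List String) (s : PySem.Set String) :
    pvInner s l = true ↔ (l.map pvKey).Nodup ∧ ∀ w ∈ l, pvKey w ∉ s := by
  induction l generalizing s with
  | nil => simp [pvInner]
  | cons w rest ih =>
      by_cases h : pvKey w ∈ s
      · simp [pvInner, h]
      · simp [pvInner, ih, h]
        constructor
        · rintro ⟨hnd, hfresh⟩
          refine ⟨⟨?_, hnd⟩, ?_⟩
          · intro x hx hxk
            exact (hfresh x hx).2 hxk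
          · intro w' hw'
            exact (hfresh w' hw').1
        · rintro ⟨⟨hnm, hnd⟩, hfresh⟩
          refine ⟨hnd, ?_⟩
          intro w' hw'
          exact ⟨hfresh w' hw', hnm w' hw'⟩

-- all adjacent pairs distinct = IsChain (· ≠ ·)
theorem zip_tail_all_ne (keys : List String) :
    ((keys.zip keys.tail).all (fun q => q.1 != q.2) = true) ↔ keys.IsChain (· ≠ ·) := by
  induction keys with
  | nil => simp
  | cons a t ih =>
      cases t with
      | nil => simp
      | cons b t' =>
          rw [List.isChain_cons_cons]
          simp only [List.tail_cons] at ih ⊢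
          simp only [List.zip_cons_cons, List.all_cons, Bool.and_eq_true, bne_iff_ne]
          rw [ih]

-- in a (≤)-sorted list, no equal neighbours is full distinctness
theorem chain_ne_iff_nodup_of_sorted (keys : List String)
    (hs : keys.Pairwise (· ≤ ·)) : keys.IsChain (· ≠ ·) ↔ keys.Nodup := by
  induction keys with
  | nil => simp
  | cons a t ih =>
      rcases List.pairwise_cons.mp hs with ⟨hle, ht⟩
      constructor
      · intro hc
        cases t with
        | nil => simp
        | cons b t' =>
            rcases List.isChain_cons_cons.mp hc with ⟨hab, htc⟩
            refine List.nodup_cons.mpr ⟨?_, (ih ht).mp htc⟩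
            intro hmem
            have hba : b ≤ a := by
              rcases List.mem_cons.mp hmem with rfl | hmem'
              · exact le_refl _
              · rcases List.pairwise_cons.mp ht with ⟨hble, _⟩
                exact hble a hmem'
            exact hab (le_antisymm (hle b (by simp)) hba)
      · intro hnd
        exact List.Pairwise.isChain hnd

-- the per-passphrase tests of the two ports agree
theorem pred_eq (p : List String) :
    pvInner PySem.Set.empty p = pvValid p := by
  have h1 : pvInner PySem.Set.empty p = true ↔ (p.map pvKey).Nodup := by
    rw [pvInner_iff]; simp [PySem.Set.empty]
  have hperm := PySem.List.sorted_perm (p.map pvKey) (fun s => s) false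
  have h2 : pvValid p = true ↔ (p.map pvKey).Nodup := by
    unfold pvValid
    rw [zip_tail_all_ne, chain_ne_iff_nodup_of_sorted _
      (PySem.List.sorted_pairwise (p.map pvKey) (fun s => s))]
    exact hperm.nodup_iff
  cases hb : pvInner PySem.Set.empty p with
  | true => exact (h2.mpr (h1.mp hb)).symm
  | false =>
      cases hb2 : pvValid p with
      | true => exact absurd (h1.mpr (h2.mp hb2)) (by simpa [PySem.Set.empty] using hb)
      | false => rfl

-- A's counting foldl = B's sum of 0/1 map
theorem foldl_count_eq_sum (l : List (List String)) (c : Int) :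
    l.foldl (fun count p => if pvInner PySem.Set.empty p then count + 1 else count) c
      = c + (l.map (fun p => if pvValid p then (1 : Int) else 0)).sum := by
  induction l generalizing c with
  | nil => simp
  | cons p rest ih =>
      rw [List.foldl_cons, List.map_cons, List.sum_cons, ih, pred_eq]
      by_cases h : pvValid p = true
      · simp [h]; ring
      · simp [h]

-- ===== VERDICT (by name: the statement is the Claim_ definition above) =====
theorem part_two_spec : Claim_equal_part_two := by
  intro passphrases _
  unfold Spec_part_two part_two part_two_alt
  rw [foldl_count_eq_sum]; ring
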